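-- pv_equiv track=rewrite | github.com/satoshun-example/algorithm-ari | python/2-4-2_2_test.py | priority_queue2
-- ===== SOURCE A (Python) =====
-- def priority_queue2(n, l, p, a, b):
--     q = []
--     c = 0
--     while True:
--         if l <= p:
--             break
--         s = 0
--         for e in a:
--             if e < p:
--                 break
--             s += 1
--         for _ in range(s):
--             a.pop(0)
--             q += [b.pop(0)]
--         if len(q) == 0:
--             return -1
--         c += 1
--         q = sorted(q, reverse=True)
--         p += q.pop(0)
--     return c
-- ===== SOURCE B (Python) =====
-- def priority_queue2(n, l, p, a, b):
--     # Index pointers into a/b instead of pop(0); per round take max(q) and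
--     # remove it instead of re-sorting the whole queue. Does not mutate a/b
--     # (equivalence is about the return value only; A empties a/b in place).
--     i = 0
--     q = []
--     c = 0
--     while l > p:
--         while i < len(a) and a[i] >= p:
--             q.append(b[i])
--             i += 1
--         if not q:
--             return -1
--         mx = max(q)
--         q.remove(mx)
--         p += mx
--         c += 1
--     return c
-- ===== Notes on version B (the rewrite author's own statement) =====
-- stated objective: alternative
-- what changed: B replaces A's per-round full re-sort of the queue plus pop(0) consumption of a/b by index pointers into a/b and a single max()+remove() selection per round, never mutating the inputs.
-- outside the precondition, e.g. on priority_queue2(0, 5, 0, [1, 2], [7]): A raises IndexError, B raises IndexError; on priority_queue2(0, 0, 0, [1], []): A returns 0, B returns 0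
import Mathlib
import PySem

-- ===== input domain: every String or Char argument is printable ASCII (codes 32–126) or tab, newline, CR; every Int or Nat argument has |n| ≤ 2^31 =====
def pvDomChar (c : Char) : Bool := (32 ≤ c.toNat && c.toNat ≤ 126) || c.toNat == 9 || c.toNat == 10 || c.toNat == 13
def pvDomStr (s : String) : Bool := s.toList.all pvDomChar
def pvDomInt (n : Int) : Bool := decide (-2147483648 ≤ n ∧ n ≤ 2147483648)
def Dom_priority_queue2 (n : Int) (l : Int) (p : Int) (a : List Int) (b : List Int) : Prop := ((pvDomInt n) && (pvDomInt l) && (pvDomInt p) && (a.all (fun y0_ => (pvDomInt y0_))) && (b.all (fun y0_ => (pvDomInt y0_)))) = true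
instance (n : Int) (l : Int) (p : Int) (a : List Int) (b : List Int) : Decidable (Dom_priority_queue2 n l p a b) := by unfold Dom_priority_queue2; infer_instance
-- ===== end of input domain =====

-- B selects each round's maximum with max()+remove() over an index-pointer scan of a/b instead of
-- A's pop(0) consumption and per-round full re-sort; equivalence is about the return value only
-- (A empties a and b in place, B does not mutate them).

-- ===== PORT A =====
-- `s = 0; for e in a: if e < p: break; s += 1`
def countGE (a : List Int) (p : Int) : Nat :=
  match a with
  | [] => 0
  | e :: t => if e < p then 0 else countGE t p + 1

-- `for _ in range(s): a.pop(0); q += [b.pop(0)]` — b.headI/b.tail is exact for b.pop(0) whenever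
-- b ≠ [], which Pre_ (len(a) ≤ len(b)) guarantees at every reached pop.
def popLoopA : Nat → List Int × List Int × List Int → List Int × List Int × List Int
  | 0, st => st
  | s + 1, (a, b, q) => popLoopA s (a.tail, b.tail, q ++ [b.headI])

-- the `while True` loop of A; state (p, q, a, b, c); fuel a.length + 1 bounds the number of
-- rounds (each round removes one queue element net), so the fuel-0 guard is never reached
def loopA : Nat → Int → Int → List Int → List Int → List Int → Int → Int
  | 0, _, _, _, _, _, _ => 0
  | fuel + 1, l, p, q, a, b, c =>
    if l ≤ p then c
    else if (popLoopA (countGE a p) (a, b, q)).2.2 = [] then -1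
    else
      loopA fuel l
        (p + (PySem.List.sorted (popLoopA (countGE a p) (a, b, q)).2.2 (fun x => x) true).headI)
        (PySem.List.sorted (popLoopA (countGE a p) (a, b, q)).2.2 (fun x => x) true).tail
        (popLoopA (countGE a p) (a, b, q)).1
        (popLoopA (countGE a p) (a, b, q)).2.1
        (c + 1)

def priority_queue2 (n : Int) (l : Int) (p : Int) (a : List Int) (b : List Int) : Int :=
  loopA (a.length + 1) l p [] a b 0

-- ===== PORT B =====
-- `while i < len(a) and a[i] >= p: q.append(b[i]); i += 1` — b.getD i 0 is exact for b[i] since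
-- Pre_ gives i < len(a) ≤ len(b) at every access.
def innerB (a b : List Int) (p : Int) : Nat → Nat → List Int → Nat × List Int
  | 0, i, q => (i, q)   -- fuel guard, never reached from fuel = a.length - i + 1
  | fuel + 1, i, q =>
    if h : i < a.length then
      if p ≤ a[i] then innerB a b p fuel (i + 1) (q ++ [b.getD i 0])
      else (i, q)
    else (i, q)

-- the `while l > p` loop of B; state (p, i, q, c); same fuel bound as loopA
def loopB : Nat → Int → List Int → List Int → Int → Nat → List Int → Int → Int
  | 0, _, _, _, _, _, _, _ => 0
  | fuel + 1, l, a, b, p, i, q, c =>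
    if l ≤ p then c
    else if (innerB a b p (a.length - i + 1) i q).2 = [] then -1
    else
      loopB fuel l a b
        (p + (PySem.List.max? (innerB a b p (a.length - i + 1) i q).2 (fun x => x)).getD 0)  -- mx = max(q)
        (innerB a b p (a.length - i + 1) i q).1
        ((PySem.List.remove? (innerB a b p (a.length - i + 1) i q).2
            ((PySem.List.max? (innerB a b p (a.length - i + 1) i q).2 (fun x => x)).getD 0)).getD [])  -- q.remove(mx)
        (c + 1)

def priority_queue2_alt (n : Int) (l : Int) (p : Int) (a : List Int) (b : List Int) : Int :=
  loopB (a.length + 1) l a b p 0 [] 0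

-- ===== PRECONDITION & SPEC =====
-- Pre_ excludes inputs with len(b) < len(a): there A can raise IndexError at b.pop(0) (and B at
-- b[i]); the bound is sufficient, not exact — on some such inputs the loop stops before touching
-- the missing part of b and A still returns (see the cited example), so Pre_ is slightly narrower
-- than A's exact domain.
def Pre_priority_queue2 (n : Int) (l : Int) (p : Int) (a : List Int) (b : List Int) : Prop :=
  a.length ≤ b.length
instance (n : Int) (l : Int) (p : Int) (a : List Int) (b : List Int) : Decidable (Pre_priority_queue2 n l p a b) := by unfold Pre_priority_queue2; infer_instance

def pvWitness_priority_queue2 : Int × Int × Int × List Int × List Int := (0, 5, 1, [1, 2], [3, 4])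

def Spec_priority_queue2 (n : Int) (l : Int) (p : Int) (a : List Int) (b : List Int) (out : Int) : Prop := out = priority_queue2_alt n l p a b
instance (n : Int) (l : Int) (p : Int) (a : List Int) (b : List Int) (out : Int) : Decidable (Spec_priority_queue2 n l p a b out) := by unfold Spec_priority_queue2; infer_instance

-- ===== CLAIM (what is proved, stated in full; the proofs are below) =====
def Claim_equal_priority_queue2 : Prop := ∀ (n : Int) (l : Int) (p : Int) (a : List Int) (b : List Int), Dom_priority_queue2 n l p a b → Pre_priority_queue2 n l p a b → Spec_priority_queue2 n l p a b (priority_queue2 n l p a b)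

-- ===== LEMMAS AND PROOFS =====

theorem countGE_le (a : List Int) (p : Int) : countGE a p ≤ a.length := by
  induction a with
  | nil => simp [countGE]
  | cons e t ih => simp only [countGE, List.length_cons]; split <;> omega

-- A's pop loop moves the first s elements of b onto q and drops them from a and b.
theorem popLoopA_eq (s : Nat) : ∀ a b q : List Int, s ≤ a.length → s ≤ b.length →
    popLoopA s (a, b, q) = (a.drop s, b.drop s, q ++ b.take s) := by
  induction s with
  | zero => intro a b q _ _; simp [popLoopA]
  | succ s ih =>
    intro a b q ha hb
    match a, b with
    | x :: a', y :: b' =>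
      simp only [popLoopA, List.tail_cons, List.headI_cons, List.drop_succ_cons,
        List.take_succ_cons]
      rw [ih a' b' (q ++ [y]) (by simpa using ha) (by simpa using hb)]
      simp

-- B's inner while advances i past the same s elements and appends the same slice of b to q.
theorem innerB_eq (a b : List Int) (p : Int) (hb : a.length ≤ b.length) : ∀ i q, i ≤ a.length →
    innerB a b p (a.length - i + 1) i q =
      (i + countGE (a.drop i) p, q ++ ((b.drop i).take (countGE (a.drop i) p))) := by
  intro i
  induction hk : a.length - i using Nat.strong_induction_on generalizing i with
  | _ k ih =>
    intro q hi
    rw [innerB]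
    by_cases hlt : i < a.length
    · have hdrop : a.drop i = a[i] :: a.drop (i + 1) := List.drop_eq_getElem_cons hlt
      have hbdrop : b.drop i = b[i]'(by omega) :: b.drop (i + 1) :=
        List.drop_eq_getElem_cons (by omega)
      simp only [hlt, dif_pos]
      by_cases hp : p ≤ a[i]
      · have hkk : k = a.length - (i + 1) + 1 := by omega
        have := ih (a.length - (i + 1)) (by omega) (i + 1) rfl (q ++ [b.getD i 0]) (by omega)
        rw [if_pos hp, hkk, this]
        have hgetD : b.getD i 0 = b[i]'(by omega) := List.getD_eq_getElem b 0 (by omega)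
        rw [hdrop, hbdrop]
        simp only [countGE, hgetD]
        rw [if_neg (by omega)]
        refine Prod.ext ?_ ?_
        · simp; omega
        · simp only []
          rw [List.take_succ_cons]
          simp
      · rw [if_neg hp, hdrop]
        simp only [countGE]
        rw [if_pos (by omega)]
        simp
    · have hi' : i = a.length := by omega
      simp only [hlt, dif_neg, not_false_iff]
      rw [List.drop_eq_nil_of_le (le_of_eq hi'.symm)]
      simp [countGE]

theorem main_loop_eq (l : Int) (a b : List Int) (hb : a.length ≤ b.length) :
    ∀ N i (qA qB : List Int) p c, (a.length - i) + qA.length ≤ N → i ≤ a.length →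
      qB.Perm qA →
      loopA (N + 1) l p qA (a.drop i) (b.drop i) c = loopB (N + 1) l a b p i qB c := by
  intro N
  induction N using Nat.strong_induction_on with
  | _ N ih =>
  intro i qA qB p c hN hi hperm
  rw [loopA, loopB]
  by_cases hl : l ≤ p
  · simp [hl]
  rw [if_neg hl, if_neg hl]
  have hsle : countGE (a.drop i) p ≤ a.length - i := by
    have := countGE_le (a.drop i) p
    simpa [List.length_drop] using this
  rw [popLoopA_eq (countGE (a.drop i) p) (a.drop i) (b.drop i) qA
        (by simp [List.length_drop]; omega) (by simp [List.length_drop]; omega),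
      innerB_eq a b p hb i qB hi]
  simp only []
  have hTlen : ((b.drop i).take (countGE (a.drop i) p)).length = countGE (a.drop i) p := by
    simp [List.length_take, List.length_drop]; omega
  have hP' : (qB ++ (b.drop i).take (countGE (a.drop i) p)).Perm
      (qA ++ (b.drop i).take (countGE (a.drop i) p)) := hperm.append_right _
  by_cases hq : qA ++ (b.drop i).take (countGE (a.drop i) p) = []
  · have hqB : qB ++ (b.drop i).take (countGE (a.drop i) p) = [] := by
      rw [hq] at hP'; exact hP'.eq_nil
    rw [if_pos hq, if_pos hqB]
  · have hqB : qB ++ (b.drop i).take (countGE (a.drop i) p) ≠ [] := by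
      intro h
      have hle := hP'.length_eq
      rw [h] at hle
      exact hq (List.length_eq_zero_iff.mp hle.symm)
    rw [if_neg hq, if_neg hqB]
    obtain ⟨m, hm⟩ : ∃ m, PySem.List.max? (qB ++ (b.drop i).take (countGE (a.drop i) p))
        (fun x : Int => x) = some m := by
      cases hmx : PySem.List.max? (qB ++ (b.drop i).take (countGE (a.drop i) p))
          (fun x : Int => x) with
      | none => exact absurd ((PySem.List.max?_eq_none_iff _ _).mp hmx) hqB
      | some m => exact ⟨m, rfl⟩
    have hmem : m ∈ qB ++ (b.drop i).take (countGE (a.drop i) p) := PySem.List.max?_mem hm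
    obtain ⟨h0, t0, hsort⟩ : ∃ h0 t0, PySem.List.sorted
        (qA ++ (b.drop i).take (countGE (a.drop i) p)) (fun x : Int => x) true = h0 :: t0 := by
      cases hse : PySem.List.sorted (qA ++ (b.drop i).take (countGE (a.drop i) p))
          (fun x : Int => x) true with
      | nil => exact absurd ((PySem.List.sorted_eq_nil_iff _ _ _).mp hse) hq
      | cons h0 t0 => exact ⟨h0, t0, rfl⟩
    have hhA : h0 ∈ qA ++ (b.drop i).take (countGE (a.drop i) p) := by
      have : h0 ∈ PySem.List.sorted (qA ++ (b.drop i).take (countGE (a.drop i) p))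
          (fun x : Int => x) true := by rw [hsort]; exact List.mem_cons_self
      exact (PySem.List.mem_sorted _ _ _ _).mp this
    have hmh : m = h0 := by
      have h1 := PySem.List.key_head_sorted_rev_ge _ (fun x : Int => x) hsort
      have h2 := PySem.List.max?_isMax hm
      exact le_antisymm (h1 m (hP'.mem_iff.mp hmem)) (h2 h0 (hP'.mem_iff.mpr hhA))
    rw [hsort, hm, hmh]
    simp only [Option.getD_some, List.headI_cons, List.tail_cons]
    rw [PySem.List.remove?_eq_some_erase _ h0 (hmh ▸ hmem)]
    simp only [Option.getD_some]
    have hsp : (h0 :: t0).Perm (qA ++ (b.drop i).take (countGE (a.drop i) p)) := by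
      rw [← hsort]; exact PySem.List.sorted_perm _ _ _
    have ht0 : ((qB ++ (b.drop i).take (countGE (a.drop i) p)).erase h0).Perm t0 := by
      have e1 : t0.Perm ((qA ++ (b.drop i).take (countGE (a.drop i) p)).erase h0) :=
        (hsp.trans (List.perm_cons_erase hhA)).cons_inv
      exact (hP'.erase h0).trans e1.symm
    have hqlen : qA.length + countGE (a.drop i) p ≠ 0 := by
      intro h0'
      apply hq
      have hz : (qA ++ (b.drop i).take (countGE (a.drop i) p)).length = 0 := by
        rw [List.length_append, hTlen]; omega
      exact List.length_eq_zero_iff.mp hz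
    have ht0len : t0.length = qA.length + countGE (a.drop i) p - 1 := by
      have hlp := hsp.length_eq
      simp only [List.length_cons, List.length_append, hTlen] at hlp
      omega
    rw [List.drop_drop, List.drop_drop]
    have hN1 : N - 1 + 1 = N := by omega
    have := ih (N - 1) (by omega) (i + countGE (a.drop i) p) t0
      ((qB ++ (b.drop i).take (countGE (a.drop i) p)).erase h0) (p + h0) (c + 1)
      (by omega) (by omega) ht0
    rw [hN1] at this
    exact this

-- ===== VERDICT (by name: the statement is the Claim_ definition above) =====
theorem priority_queue2_spec : Claim_equal_priority_queue2 := by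
  intro n l p a b _hd hpre
  unfold Spec_priority_queue2 priority_queue2 priority_queue2_alt
  have := main_loop_eq l a b hpre a.length 0 [] [] p 0 (by simp) (by simp) (List.Perm.refl _)
  simpa using this
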